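-- pv_equiv track=rewrite | github.com/Ashmit-Ag/mugen-transformer | model/composer/music_theory.py | get_scale_degree
-- ===== SOURCE A (Python) =====
-- def get_scale_degree(note, scale):
--     """
--     Get the scale degree (1-7) of a note in a scale.
--
--     Args:
--         note (int): MIDI note number
--         scale (list): List of MIDI note numbers in the scale
--
--     Returns:
--         int: Scale degree (1-7) or None if the note is not in the scale
--     """
--     # Get the pitch class (0-11) of the note
--     pitch_class = note % 12
--
--     # Get the pitch classes of the scale notes (one octave)
--     scale_pitch_classes = [scale_note % 12 for scale_note in scale]
--     scale_pitch_classes = sorted(list(set(scale_pitch_classes)))  # Remove duplicates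
--
--     # Find the scale degree
--     if pitch_class in scale_pitch_classes:
--         return scale_pitch_classes.index(pitch_class) + 1
--     else:
--         return None
-- ===== SOURCE B (Python) =====
-- def get_scale_degree(note, scale):
--     """Rank-by-counting reimplementation: the scale degree of a pitch class
--     present in the scale is 1 + number of distinct scale pitch classes below it
--     (no sorting, no list.index)."""
--     pc = note % 12
--     pcs = {n % 12 for n in scale}
--     if pc not in pcs:
--         return None
--     return 1 + sum(1 for p in pcs if p < pc)
-- ===== Notes on version B (the rewrite author's own statement) =====
-- stated objective: simpler
-- what changed: B replaces A's sort-the-deduplicated-pitch-classes-then-list.index pass with a direct rank computation: the degree is 1 plus the count of distinct scale pitch classes strictly below the note's pitch class, so no sorted list is ever built or searched.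
import Mathlib
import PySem

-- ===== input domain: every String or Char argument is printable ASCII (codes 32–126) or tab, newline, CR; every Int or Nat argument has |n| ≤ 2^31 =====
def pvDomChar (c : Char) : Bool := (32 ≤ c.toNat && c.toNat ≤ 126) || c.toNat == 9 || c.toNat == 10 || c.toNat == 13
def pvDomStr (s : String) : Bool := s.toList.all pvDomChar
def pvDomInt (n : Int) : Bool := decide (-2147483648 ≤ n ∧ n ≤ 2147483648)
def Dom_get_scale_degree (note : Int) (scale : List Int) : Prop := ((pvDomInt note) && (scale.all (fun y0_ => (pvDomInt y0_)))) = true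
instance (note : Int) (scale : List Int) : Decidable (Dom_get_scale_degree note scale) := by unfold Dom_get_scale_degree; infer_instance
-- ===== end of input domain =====

-- B computes the scale degree as a counting rank over the distinct pitch classes
-- instead of A's sort + list.index; objective: simpler.

-- ===== PORT A =====
def get_scale_degree (note : Int) (scale : List Int) : Option Int :=
  let pitch_class := PySem.Int.mod note 12
  let spc0 := scale.map (fun n => PySem.Int.mod n 12)
  let spc := PySem.List.sorted (PySem.Set.ofList spc0) (fun x => x) false
  if pitch_class ∈ spc then
    (PySem.List.index? spc pitch_class).map (fun i => (i : Int) + 1)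
  else
    none

-- ===== PORT B =====
def get_scale_degree_alt (note : Int) (scale : List Int) : Option Int :=
  let pc := PySem.Int.mod note 12
  let pcs : PySem.Set Int := PySem.Set.ofList (scale.map (fun n => PySem.Int.mod n 12))
  if pc ∈ pcs then
    some (1 + (pcs.countP (fun p => decide (p < pc)) : Int))
  else
    none

-- ===== PRECONDITION & SPEC =====
def Spec_get_scale_degree (note : Int) (scale : List Int) (out : Option Int) : Prop := out = get_scale_degree_alt note scale
instance (note : Int) (scale : List Int) (out : Option Int) : Decidable (Spec_get_scale_degree note scale out) := by unfold Spec_get_scale_degree; infer_instance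

-- ===== CLAIM (what is proved, stated in full; the proofs are below) =====
def Claim_equal_get_scale_degree : Prop := ∀ (note : Int) (scale : List Int), Dom_get_scale_degree note scale → Spec_get_scale_degree note scale (get_scale_degree note scale)

-- ===== LEMMAS AND PROOFS =====

-- In a strictly increasing list, the index of a member equals the number of
-- elements strictly below it.
theorem index?_eq_countP_lt (L : List Int) (pc : Int)
    (hs : L.Pairwise (· < ·)) (hm : pc ∈ L) :
    PySem.List.index? L pc = some (L.countP (fun p => decide (p < pc))) := by
  induction L with
  | nil => cases hm
  | cons x t ih =>
    rcases List.pairwise_cons.1 hs with ⟨hx, ht⟩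
    by_cases hxp : x = pc
    · subst hxp
      have h0 : t.countP (fun p => decide (p < x)) = 0 := by
        apply List.countP_eq_zero.2
        intro p hp
        simp only [decide_eq_true_eq]
        exact not_lt.2 (le_of_lt (hx p hp))
      rw [PySem.List.index?_cons_self]
      simp [h0]
    · have hmt : pc ∈ t := by
        rcases List.mem_cons.1 hm with h | h
        · exact absurd h.symm hxp
        · exact h
      rw [PySem.List.index?_cons_of_ne (xs := t) hxp, ih ht hmt]
      have hlt : x < pc := hx pc hmt
      simp [List.countP_cons, hlt]

theorem get_scale_degree_spec_aux (note : Int) (scale : List Int) :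
    get_scale_degree note scale = get_scale_degree_alt note scale := by
  unfold get_scale_degree get_scale_degree_alt
  simp only []
  set pc := PySem.Int.mod note 12 with hpc
  set S : List Int := PySem.Set.ofList (scale.map (fun n => PySem.Int.mod n 12)) with hS
  set L : List Int := PySem.List.sorted S (fun x => x) false with hL
  have hperm : L.Perm S := PySem.List.sorted_perm S (fun x => x) false
  have hmem : pc ∈ L ↔ pc ∈ S := hperm.mem_iff
  by_cases h : pc ∈ S
  · rw [if_pos (hmem.2 h), if_pos h]
    have hpw : L.Pairwise (· < ·) := by
      rw [hL, hS]
      exact PySem.List.sorted_ofList_pairwise_lt (scale.map (fun n => PySem.Int.mod n 12))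
    rw [index?_eq_countP_lt L pc hpw (hmem.2 h)]
    have hcnt : L.countP (fun p => decide (p < pc)) = S.countP (fun p => decide (p < pc)) :=
      hperm.countP_eq _
    simp [hcnt, add_comm]
  · rw [if_neg (fun hc => h (hmem.1 hc)), if_neg h]

-- ===== VERDICT (by name: the statement is the Claim_ definition above) =====
theorem get_scale_degree_spec : Claim_equal_get_scale_degree := by
  intro note scale _
  exact get_scale_degree_spec_aux note scale
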